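-- pv_equiv track=rewrite | github.com/klenwell/code-challenges | python/session-logs/solve.py | payment_counts
-- ===== SOURCE A (Python) =====
-- def payment_counts(sessions):
--     payment_counts = {
--         'attempts': 0,
--         'succeess': 0,
--         'failure': 0
--     }
--
--     for _, _, flow, _ in sessions:
--         payment_counts['succeess'] += flow.count('$')
--         payment_counts['failure'] += flow.count('*')
--
--     payment_counts['attempts'] = payment_counts['succeess'] + payment_counts['failure']
--     return payment_counts
-- ===== SOURCE B (Python) =====
-- def payment_counts(sessions):
--     # Flatten all flows into one list of payment-marker characters, then derive
--     # the three figures from it: attempts = how many markers, succeess = '$'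
--     # markers, failure = the rest (by subtraction; '*' is never counted).
--     markers = [ch for _, _, flow, _ in sessions for ch in flow if ch in '$*']
--     attempts = len(markers)
--     succ = markers.count('$')
--     return {'attempts': attempts, 'succeess': succ, 'failure': attempts - succ}
-- ===== Notes on version B (the rewrite author's own statement) =====
-- stated objective: alternative
-- what changed: B first flattens every flow into one list of only the payment-marker characters ('$'/'*'), then derives attempts as its length, succeess as one count of '$' in that list, and failure by subtraction (attempts - succeess), never counting '*'; A instead runs two substring .count() scans per session and accumulates into a pre-seeded dict, computing attempts last as the sum.
import Mathlib
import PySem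

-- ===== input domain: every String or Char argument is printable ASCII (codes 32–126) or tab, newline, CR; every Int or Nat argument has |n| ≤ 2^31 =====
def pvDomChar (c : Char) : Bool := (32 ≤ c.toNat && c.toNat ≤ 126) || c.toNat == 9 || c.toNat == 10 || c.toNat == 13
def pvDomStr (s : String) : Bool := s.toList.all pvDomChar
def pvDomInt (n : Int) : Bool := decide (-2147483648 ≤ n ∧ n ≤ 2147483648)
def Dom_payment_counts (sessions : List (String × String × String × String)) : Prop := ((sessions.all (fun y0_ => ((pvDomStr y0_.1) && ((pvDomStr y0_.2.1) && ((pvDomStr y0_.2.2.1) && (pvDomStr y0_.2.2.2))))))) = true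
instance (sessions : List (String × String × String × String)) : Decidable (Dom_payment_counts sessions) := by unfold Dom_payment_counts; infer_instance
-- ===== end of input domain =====

-- B flattens all flows to one list of marker characters and derives failure by
-- subtraction instead of per-session .count() scans (objective: alternative; same cost).


-- ===== PORT A =====
-- literal transliteration: a dict seeded with the three keys, per-session '+=' of the two
-- substring counts, and a final overwrite of 'attempts'; the dict's items are returned
def payment_counts (sessions : List (String × String × String × String)) : List (String × Int) :=
  let d0 : PySem.Dict String Int :=
    ((PySem.Dict.empty.insert "attempts" 0).insert "succeess" 0).insert "failure" 0
  let d := sessions.foldl (fun d s =>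
    let d := d.insert "succeess" (d.getD "succeess" 0 + (PySem.Str.count s.2.2.1 "$" : Int))
    d.insert "failure" (d.getD "failure" 0 + (PySem.Str.count s.2.2.1 "*" : Int))) d0
  (d.insert "attempts" (d.getD "succeess" 0 + d.getD "failure" 0)).items

-- ===== PORT B =====
-- literal transliteration of Source B: flatten every flow into one list of the marker
-- characters ("ch in '$*'" ported as membership in that two-character string's chars),
-- then attempts = its length, succ = one count of '$', failure by subtraction
def payment_counts_alt (sessions : List (String × String × String × String)) : List (String × Int) :=
  let markers : List Char :=
    sessions.flatMap (fun s => s.2.2.1.toList.filter (fun ch => ("$*" : String).toList.contains ch))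
  let attempts : Int := markers.length
  let succ : Int := markers.count '$'
  [("attempts", attempts), ("succeess", succ), ("failure", attempts - succ)]

-- ===== PRECONDITION & SPEC =====
def Spec_payment_counts (sessions : List (String × String × String × String)) (out : List (String × Int)) : Prop := out = payment_counts_alt sessions
instance (sessions : List (String × String × String × String)) (out : List (String × Int)) : Decidable (Spec_payment_counts sessions out) := by unfold Spec_payment_counts; infer_instance

-- ===== CLAIM (what is proved, stated in full; the proofs are below) =====
def Claim_equal_payment_counts : Prop := ∀ (sessions : List (String × String × String × String)), Dom_payment_counts sessions → Spec_payment_counts sessions (payment_counts sessions)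

-- ===== LEMMAS AND PROOFS =====

-- Python str.count with a single-character needle is the character count
theorem chars_count_go_single (c : Char) : ∀ (s : List Char) (fuel acc : Nat), s.length ≤ fuel →
    PySem.Chars.count.go [c] fuel s acc = acc + s.count c := by
  intro s
  induction s with
  | nil =>
    intro fuel acc _
    cases fuel <;> simp [PySem.Chars.count.go]
  | cons h t ih =>
    intro fuel acc hle
    match fuel, hle with
    | Nat.succ f, hle =>
      rw [PySem.Chars.count.go]
      by_cases hch : c = h
      · subst hch
        simp only [List.isPrefixOf, beq_self_eq_true, Bool.and_self, if_true,
          List.length_cons, List.length_nil, List.drop_succ_cons, List.drop_zero]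
        rw [ih f (acc + 1) (by simpa using hle)]
        simp
        omega
      · have hpf : List.isPrefixOf [c] (h :: t) = false := by
          simp [List.isPrefixOf]; exact fun hc => absurd hc hch
        rw [hpf]
        simp only [Bool.false_eq_true, if_false]
        rw [ih f acc (by simpa using hle)]
        rw [List.count_cons]
        simp [Ne.symm hch]

theorem chars_count_single (l : List Char) (c : Char) :
    PySem.Chars.count l [c] = l.count c := by
  unfold PySem.Chars.count
  simp only [List.isEmpty_cons, Bool.false_eq_true, if_false]
  simpa using chars_count_go_single c l l.length 0 le_rfl

-- total number of occurrences of c in all flows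
def flowCount (sessions : List (String × String × String × String)) (c : Char) : Int :=
  (sessions.map (fun s => (s.2.2.1.toList.count c : Int))).sum

-- one iteration of A's loop on the literal three-key dict
theorem a_step (s f cs cf : Int) :
    (((PySem.Dict.mk [("attempts", (0:Int)), ("succeess", s), ("failure", f)]).insert "succeess"
        ((PySem.Dict.mk [("attempts", (0:Int)), ("succeess", s), ("failure", f)]).getD "succeess" 0 + cs)).insert
      "failure"
      (((PySem.Dict.mk [("attempts", (0:Int)), ("succeess", s), ("failure", f)]).insert "succeess"
          ((PySem.Dict.mk [("attempts", (0:Int)), ("succeess", s), ("failure", f)]).getD "succeess" 0 + cs)).getD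
        "failure" 0 + cf)) =
    PySem.Dict.mk [("attempts", 0), ("succeess", s + cs), ("failure", f + cf)] := by
  simp [PySem.Dict.insert, PySem.Dict.contains, PySem.Dict.getD, PySem.Dict.get?]

-- A's loop keeps the literal three-key dict, accumulating the two counts
theorem a_loop (sessions : List (String × String × String × String)) (s f : Int) :
    (sessions.foldl (fun d x =>
        let d := d.insert "succeess" (d.getD "succeess" 0 + (PySem.Str.count x.2.2.1 "$" : Int))
        d.insert "failure" (d.getD "failure" 0 + (PySem.Str.count x.2.2.1 "*" : Int)))
      (PySem.Dict.mk [("attempts", 0), ("succeess", s), ("failure", f)])) =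
    PySem.Dict.mk [("attempts", 0), ("succeess", s + flowCount sessions '$'),
                   ("failure", f + flowCount sessions '*')] := by
  induction sessions generalizing s f with
  | nil => simp [flowCount]
  | cons x t ih =>
    simp only [List.foldl_cons]
    rw [a_step, ih]
    have h1 : ("$" : String).toList = ['$'] := rfl
    have h2 : ("*" : String).toList = ['*'] := rfl
    simp only [flowCount, List.map_cons, List.sum_cons, PySem.Dict.mk.injEq, List.cons.injEq,
      Prod.mk.injEq, PySem.Str.count_eq, h1, h2, chars_count_single, true_and, and_true]
    constructor <;> ring

-- normalising the membership test to the boolean form simp produces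
theorem contains_norm :
    (fun ch => (['$', '*'] : List Char).contains ch) = (fun ch : Char => ch == '$' || ch == '*') := by
  funext ch; simp [BEq.beq]

-- the markers kept from one flow: as many as its '$'s plus its '*'s
theorem filter_markers_length (l : List Char) :
    (l.filter (fun ch : Char => ch == '$' || ch == '*')).length =
      l.count '$' + l.count '*' := by
  induction l with
  | nil => simp
  | cons h t ih =>
    simp only [List.filter_cons, List.count_cons]
    by_cases h1 : h = '$'
    · simp [h1, ih]; omega
    · by_cases h2 : h = '*'
      · simp [h2, ih]; omega
      · simp [h1, h2, ih]

-- counting '$' among the kept markers is counting '$' in the flow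
theorem filter_markers_count (l : List Char) :
    (l.filter (fun ch : Char => ch == '$' || ch == '*')).count '$' = l.count '$' := by
  rw [List.count_filter]
  simp

-- B's flattened marker list: its length and '$'-count are the flow totals
theorem b_markers (sessions : List (String × String × String × String)) :
    ((sessions.flatMap (fun s =>
        s.2.2.1.toList.filter (fun ch => ("$*" : String).toList.contains ch))).length : Int) =
      flowCount sessions '$' + flowCount sessions '*' ∧
    ((sessions.flatMap (fun s =>
        s.2.2.1.toList.filter (fun ch => ("$*" : String).toList.contains ch))).count '$' : Int) =
      flowCount sessions '$' := by
  induction sessions with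
  | nil => simp [flowCount]
  | cons x t ih =>
    obtain ⟨ihl, ihc⟩ := ih
    have hs : ("$*" : String).toList = ['$', '*'] := rfl
    simp only [hs, contains_norm] at ihl ihc ⊢
    constructor
    · simp only [List.flatMap_cons, List.length_append, flowCount, List.map_cons, List.sum_cons]
      push_cast
      rw [ihl]
      simp only [flowCount, filter_markers_length]
      push_cast
      ring
    · simp only [List.flatMap_cons, List.count_append, flowCount, List.map_cons, List.sum_cons]
      push_cast
      rw [ihc]
      simp only [flowCount, filter_markers_count]

-- ===== VERDICT (by name: the statement is the Claim_ definition above) =====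
theorem payment_counts_spec : Claim_equal_payment_counts := by
  intro sessions _
  unfold Spec_payment_counts payment_counts payment_counts_alt
  have hd0 : (((PySem.Dict.empty.insert "attempts" (0:Int)).insert "succeess" 0).insert "failure" 0) =
      PySem.Dict.mk [("attempts", 0), ("succeess", 0), ("failure", 0)] := by
    simp [PySem.Dict.insert, PySem.Dict.contains, PySem.Dict.empty]
  obtain ⟨hl, hc⟩ := b_markers sessions
  simp only [hd0, a_loop, hl, hc]
  simp [PySem.Dict.insert, PySem.Dict.contains, PySem.Dict.getD, PySem.Dict.get?]
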